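-- pv_equiv track=rewrite | github.com/cms-sw/cmssw | Validation/RecoTau/Tools/web_templates.py | usual_validation_dataset_template
-- ===== SOURCE A (Python) =====
-- def usual_validation_dataset_template(dataset_name, root_link, ref_file, dir_link, paths_to_pictures, source_file):
--     chunk_list     = lambda l,n: [l[i:i+n] for i in range(0, len(l), n)]
--     rows_paths     = chunk_list(paths_to_pictures,2)
--     cell_template  = '        <td style="width: 640px;"><A href=%s><IMG src="%s" width="640" align="center" border="0"></A></td>'
--     row_template   = '''      <tr>
-- %s      </tr>\n'''
--     rows           = ''.join([row_template % ''.join([ cell_template % (path,path) for path in row]) for row in rows_paths])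
--     reference      = '<A href=%s>Reference</A>' % ref_file if ref_file else 'Reference not available'
--     source         = '<A href=%s>Input Source</A>'    % source_file if ref_file else 'Source not available' #ALL source files seem empty... need to check
--     return '''  <h3>%s ( <A href=%s>Root File</A> ) ( %s ) ( %s ) ( <A href=%s>Full Directory Content</A> )</h3>
--   <table style="text-align: left; " border="1" cellpadding="2" cellspacing="1">
--     <tbody>
-- %s
--     </tbody>
--   </table>
-- ''' % (dataset_name, root_link, reference, source, dir_link, rows)
-- ===== SOURCE B (Python) =====
-- def usual_validation_dataset_template(dataset_name, root_link, ref_file, dir_link, paths_to_pictures, source_file):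
--     cell_template = '        <td style="width: 640px;"><A href=%s><IMG src="%s" width="640" align="center" border="0"></A></td>'
--     row_template  = '''      <tr>
-- %s      </tr>\n'''
--     rows = ''
--     buf = None
--     for path in paths_to_pictures:
--         cell = cell_template % (path, path)
--         if buf is None:
--             buf = cell
--         else:
--             rows += row_template % (buf + cell)
--             buf = None
--     if buf is not None:
--         rows += row_template % buf
--     reference = '<A href=%s>Reference</A>' % ref_file if ref_file else 'Reference not available'
--     source    = '<A href=%s>Input Source</A>' % source_file if ref_file else 'Source not available'
--     return '''  <h3>%s ( <A href=%s>Root File</A> ) ( %s ) ( %s ) ( <A href=%s>Full Directory Content</A> )</h3>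
--   <table style="text-align: left; " border="1" cellpadding="2" cellspacing="1">
--     <tbody>
-- %s
--     </tbody>
--   </table>
-- ''' % (dataset_name, root_link, reference, source, dir_link, rows)
-- ===== Notes on version B (the rewrite author's own statement) =====
-- stated objective: alternative
-- what changed: Replaces the chunk-into-pairs-then-nested-join-comprehensions pipeline with a single pass over the paths keeping a one-cell buffer that is flushed into a row every second cell (and once at the end for an odd tail).
import Mathlib
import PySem

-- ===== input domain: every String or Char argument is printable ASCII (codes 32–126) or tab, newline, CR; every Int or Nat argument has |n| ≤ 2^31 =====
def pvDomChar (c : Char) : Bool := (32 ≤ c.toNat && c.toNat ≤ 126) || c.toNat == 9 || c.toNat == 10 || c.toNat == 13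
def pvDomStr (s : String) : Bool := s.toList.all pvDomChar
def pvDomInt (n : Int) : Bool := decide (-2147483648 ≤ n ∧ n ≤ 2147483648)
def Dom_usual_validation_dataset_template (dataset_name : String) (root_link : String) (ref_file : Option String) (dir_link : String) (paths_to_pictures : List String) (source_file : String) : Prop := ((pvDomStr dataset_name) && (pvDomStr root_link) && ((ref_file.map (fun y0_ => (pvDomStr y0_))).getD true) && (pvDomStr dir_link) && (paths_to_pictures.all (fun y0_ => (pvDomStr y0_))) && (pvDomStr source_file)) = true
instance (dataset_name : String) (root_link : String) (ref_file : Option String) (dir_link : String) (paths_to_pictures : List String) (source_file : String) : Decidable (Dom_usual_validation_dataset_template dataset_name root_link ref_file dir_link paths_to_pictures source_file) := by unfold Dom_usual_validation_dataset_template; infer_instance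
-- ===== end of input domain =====

-- B builds the rows in one pass with a one-cell buffer instead of A's chunk-into-pairs + nested joins; same output, stated as exact equality everywhere.

-- ===== PORT A =====
-- A's cell_template % (path, path)
def pvCellA (path : String) : String :=
  "        <td style=\"width: 640px;\"><A href=" ++ path ++ "><IMG src=\"" ++ path ++ "\" width=\"640\" align=\"center\" border=\"0\"></A></td>"
-- A's row_template % s
def pvRowA (s : String) : String := "      <tr>\n" ++ s ++ "      </tr>\n"

def usual_validation_dataset_template (dataset_name : String) (root_link : String) (ref_file : Option String) (dir_link : String) (paths_to_pictures : List String) (source_file : String) : String :=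
  -- chunk_list = lambda l,n: [l[i:i+n] for i in range(0, len(l), n)]
  let chunk_list : List String → Int → List (List String) :=
    fun l n => (PySem.List.pyRange 0 l.length n).map (fun i => PySem.List.slice l (some i) (some (i + n)))
  let rows_paths := chunk_list paths_to_pictures 2
  let rows := String.join (rows_paths.map (fun row => pvRowA (String.join (row.map pvCellA))))
  -- Python truthiness of ref_file: falsy iff None or the empty string
  let refTruthy : Bool := !((ref_file.getD "") == "")
  let reference := if refTruthy then "<A href=" ++ ref_file.getD "" ++ ">Reference</A>" else "Reference not available"
  let source := if refTruthy then "<A href=" ++ source_file ++ ">Input Source</A>" else "Source not available"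
  "  <h3>" ++ dataset_name ++ " ( <A href=" ++ root_link ++ ">Root File</A> ) ( " ++ reference ++ " ) ( " ++ source ++ " ) ( <A href=" ++ dir_link ++ ">Full Directory Content</A> )</h3>\n  <table style=\"text-align: left; \" border=\"1\" cellpadding=\"2\" cellspacing=\"1\">\n    <tbody>\n" ++ rows ++ "\n    </tbody>\n  </table>\n"

-- ===== PORT B =====
def pvCellB (path : String) : String :=
  "        <td style=\"width: 640px;\"><A href=" ++ path ++ "><IMG src=\"" ++ path ++ "\" width=\"640\" align=\"center\" border=\"0\"></A></td>"
def pvRowB (s : String) : String := "      <tr>\n" ++ s ++ "      </tr>\n"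
-- one loop iteration: state = (rows so far, pending buffered cell)
def pvStepB (st : String × Option String) (path : String) : String × Option String :=
  let cell := pvCellB path
  match st.2 with
  | none => (st.1, some cell)
  | some b => (st.1 ++ pvRowB (b ++ cell), none)
-- the final 'if buf is not None' flush
def pvFlushB (st : String × Option String) : String :=
  match st.2 with
  | none => st.1
  | some b => st.1 ++ pvRowB b

def usual_validation_dataset_template_alt (dataset_name : String) (root_link : String) (ref_file : Option String) (dir_link : String) (paths_to_pictures : List String) (source_file : String) : String :=
  let rows := pvFlushB (paths_to_pictures.foldl pvStepB ("", none))
  let refTruthy : Bool := !((ref_file.getD "") == "")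
  let reference := if refTruthy then "<A href=" ++ ref_file.getD "" ++ ">Reference</A>" else "Reference not available"
  let source := if refTruthy then "<A href=" ++ source_file ++ ">Input Source</A>" else "Source not available"
  "  <h3>" ++ dataset_name ++ " ( <A href=" ++ root_link ++ ">Root File</A> ) ( " ++ reference ++ " ) ( " ++ source ++ " ) ( <A href=" ++ dir_link ++ ">Full Directory Content</A> )</h3>\n  <table style=\"text-align: left; \" border=\"1\" cellpadding=\"2\" cellspacing=\"1\">\n    <tbody>\n" ++ rows ++ "\n    </tbody>\n  </table>\n"

-- ===== PRECONDITION & SPEC =====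
def Spec_usual_validation_dataset_template (dataset_name : String) (root_link : String) (ref_file : Option String) (dir_link : String) (paths_to_pictures : List String) (source_file : String) (out : String) : Prop := out = usual_validation_dataset_template_alt dataset_name root_link ref_file dir_link paths_to_pictures source_file
instance (dataset_name : String) (root_link : String) (ref_file : Option String) (dir_link : String) (paths_to_pictures : List String) (source_file : String) (out : String) : Decidable (Spec_usual_validation_dataset_template dataset_name root_link ref_file dir_link paths_to_pictures source_file out) := by unfold Spec_usual_validation_dataset_template; infer_instance

-- ===== CLAIM (what is proved, stated in full; the proofs are below) =====
def Claim_equal_usual_validation_dataset_template : Prop := ∀ (dataset_name : String) (root_link : String) (ref_file : Option String) (dir_link : String) (paths_to_pictures : List String) (source_file : String), Dom_usual_validation_dataset_template dataset_name root_link ref_file dir_link paths_to_pictures source_file → Spec_usual_validation_dataset_template dataset_name root_link ref_file dir_link paths_to_pictures source_file (usual_validation_dataset_template dataset_name root_link ref_file dir_link paths_to_pictures source_file)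

-- ===== LEMMAS AND PROOFS =====

-- structural pair-chunking, the common intermediate both ports are related to
def pairChunks : List String → List (List String)
  | [] => []
  | [x] => [[x]]
  | x :: y :: r => [x, y] :: pairChunks r

-- A's range/slice chunking rewritten over Nat
lemma chunksR (l : List String) :
    (PySem.List.pyRange 0 l.length 2).map (fun i => PySem.List.slice l (some i) (some (i + 2)))
      = (List.range ((l.length + 1) / 2)).map (fun k => (l.drop (2 * k)).take 2) := by
  rw [PySem.List.pyRange_of_pos 0 l.length (by norm_num)]
  rw [List.map_map]
  have hc : (if (0:Int) < l.length then (((l.length:Int) - 0 + 2 - 1) / 2).toNat else 0)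
      = (l.length + 1) / 2 := by
    split_ifs with h <;> omega
  rw [hc]
  refine List.map_congr_left (fun k _ => ?_)
  simp only [Function.comp]
  rw [show (0 : Int) + 2 * (k:Int) = ((2*k : Nat) : Int) by push_cast; ring]
  rw [show ((2*k : Nat) : Int) + 2 = ((2*k+2 : Nat) : Int) by push_cast; ring]
  rw [PySem.List.slice_natCast]
  congr 1
  omega

lemma chunksN (l : List String) :
    (List.range ((l.length + 1) / 2)).map (fun k => (l.drop (2 * k)).take 2) = pairChunks l := by
  induction l using pairChunks.induct with
  | case1 => simp [pairChunks]
  | case2 x => simp [pairChunks]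
  | case3 x y r ih =>
    have hlen : ((x :: y :: r).length + 1) / 2 = (r.length + 1) / 2 + 1 := by
      simp only [List.length_cons]; omega
    rw [hlen, List.range_succ_eq_map, List.map_cons, List.map_map]
    simp only [pairChunks]
    rw [← ih]
    have hmap : ∀ k : Nat, ((fun k => List.take 2 (List.drop (2 * k) (x :: y :: r))) ∘ Nat.succ) k
        = (fun k => List.take 2 (List.drop (2 * k) r)) k := by
      intro k
      simp only [Function.comp]
      rw [show 2 * Nat.succ k = (2 * k + 1) + 1 by omega]
      rw [List.drop_succ_cons, List.drop_succ_cons]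
    rw [List.map_congr_left (fun k _ => hmap k)]
    simp

-- B's loop with a buffer produces exactly the joined pair-chunk rows
lemma strFoldl (L : List String) : ∀ s : String,
    List.foldl (· ++ ·) s L = s ++ List.foldl (· ++ ·) "" L := by
  induction L with
  | nil => intro s; simp
  | cons a L ih =>
    intro s
    simp only [List.foldl_cons]
    rw [ih (s ++ a), ih ("" ++ a)]
    simp [String.append_assoc]

lemma loopB_eq (l : List String) : ∀ acc : String,
    pvFlushB (l.foldl pvStepB (acc, none))
      = acc ++ String.join ((pairChunks l).map (fun r => pvRowB (String.join (r.map pvCellB)))) := by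
  induction l using pairChunks.induct with
  | case1 => intro acc; simp [pairChunks, pvFlushB, String.join]
  | case2 x =>
    intro acc
    simp [pairChunks, pvFlushB, pvStepB, String.join]
  | case3 x y r ih =>
    intro acc
    simp only [List.foldl_cons, pvStepB, pairChunks, List.map_cons, String.join]
    rw [ih, strFoldl]
    simp [String.join, String.append_assoc]

lemma cellAB : pvCellA = pvCellB := rfl
lemma rowAB : pvRowA = pvRowB := rfl

-- ===== VERDICT (by name: the statement is the Claim_ definition above) =====
theorem usual_validation_dataset_template_spec : Claim_equal_usual_validation_dataset_template := by
  intro dataset_name root_link ref_file dir_link paths_to_pictures source_file _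
  unfold Spec_usual_validation_dataset_template
  unfold usual_validation_dataset_template usual_validation_dataset_template_alt
  simp only [cellAB, rowAB, chunksR, chunksN, loopB_eq, String.empty_append]
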